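-- pv_equiv track=rewrite | github.com/kkeolmusae/algorithm | 프로그래머스/3/12987. 숫자 게임/숫자 게임.py | solution
-- ===== SOURCE A (Python) =====
-- def solution(A, B):
--     A.sort(reverse=True)
--     B.sort(reverse=True)
--
--     answer = 0
--     i = 0
--     left = 0  # 가장 큰애
--     right = len(B) - 1  # 가장 작은애
--
--     while left <= right:
--         if A[i] >= B[left]:  # 가장 큰애끼리 붙는데 B가 지거나 비기는 경우 => 작은애 사용
--             right -= 1
--         else:
--             left += 1
--             answer += 1
--         i += 1
--
--     return answer
-- ===== SOURCE B (Python) =====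
-- def solution(A, B):
--     # Same in-place descending sorts as the original (the caller sees the same mutation).
--     A.sort(reverse=True)
--     B.sort(reverse=True)
--
--     # A only ever plays its len(B) strongest cards; ai points at the weakest of
--     # those still unbeaten.  Walk B's cards from weakest to strongest and spend
--     # a card only when it beats that weakest remaining card of A.
--     ai = len(B) - 1
--     answer = 0
--     for b in reversed(B):
--         if b > A[ai]:
--             answer += 1
--             ai -= 1
--     return answer
-- ===== Notes on version B (the rewrite author's own statement) =====
-- stated objective: simpler
-- what changed: Replaces the symmetric two-pointer scan (index i over A plus left/right pointers over B, processing B from both ends) by a single ascending greedy pass over B's cards with one pointer at the weakest still-unbeaten of A's len(B) strongest cards; same in-place descending sorts, so the observable mutation of the arguments is identical.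
import Mathlib
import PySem

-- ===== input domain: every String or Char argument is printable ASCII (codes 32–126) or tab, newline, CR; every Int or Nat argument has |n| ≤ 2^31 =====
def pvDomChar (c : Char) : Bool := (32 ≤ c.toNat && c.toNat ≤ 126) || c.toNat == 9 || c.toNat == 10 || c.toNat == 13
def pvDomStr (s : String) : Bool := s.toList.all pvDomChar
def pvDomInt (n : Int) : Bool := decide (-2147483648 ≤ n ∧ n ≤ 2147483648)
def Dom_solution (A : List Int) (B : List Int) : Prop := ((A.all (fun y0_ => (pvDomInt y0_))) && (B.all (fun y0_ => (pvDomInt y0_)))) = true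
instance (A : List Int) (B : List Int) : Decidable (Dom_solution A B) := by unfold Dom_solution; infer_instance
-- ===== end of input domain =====

-- B replaces A's symmetric two-pointer scan of B by a single ascending greedy pass with one
-- pointer into A (objective: simpler).  Both versions sort both arguments in place
-- (descending), so the observable mutation is identical; the equivalence proved here is
-- about the return value.

-- ===== PORT A =====
-- the while-loop of A: state (answer, i, left, right)
def solLoopA (As Bs : List Int) (answer i left right : Int) : Int :=
  if _h : left ≤ right then
    match PySem.List.pyGet? As i, PySem.List.pyGet? Bs left with
    | some a, some b =>
        if b ≤ a then solLoopA As Bs answer (i + 1) left (right - 1)   -- A[i] >= B[left]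
        else solLoopA As Bs (answer + 1) (i + 1) (left + 1) right
    | _, _ => answer   -- Python raises IndexError here (outside Pre_solution)
  else answer
termination_by (right + 1 - left).toNat
decreasing_by all_goals omega

def solution (A : List Int) (B : List Int) : Int :=
  let As := PySem.List.sorted A (fun x => x) true
  let Bs := PySem.List.sorted B (fun x => x) true
  solLoopA As Bs 0 0 0 ((Bs.length : Int) - 1)

-- ===== PORT B =====
-- the for-loop of B over reversed(B): state (ai, answer)
def solLoopB (As : List Int) : List Int → Int → Int → Int
  | [], _, answer => answer
  | b :: rest, ai, answer =>
      match PySem.List.pyGet? As ai with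
      | some a =>
          if a < b then solLoopB As rest (ai - 1) (answer + 1)   -- b > A[ai]
          else solLoopB As rest ai answer
      | none => answer   -- Python raises IndexError here (outside Pre_solution)

def solution_alt (A : List Int) (B : List Int) : Int :=
  let As := PySem.List.sorted A (fun x => x) true
  let Bs := PySem.List.sorted B (fun x => x) true
  solLoopB As Bs.reverse ((Bs.length : Int) - 1) 0

-- ===== PRECONDITION & SPEC =====
-- Pre_ is exactly A's returning domain: with len(B) > len(A) the loop indexes A[i] past the
-- end and Python raises IndexError.
def Pre_solution (A : List Int) (B : List Int) : Prop := B.length ≤ A.length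
instance (A : List Int) (B : List Int) : Decidable (Pre_solution A B) := by unfold Pre_solution; infer_instance
def pvWitness_solution : List Int × List Int := ([3, 1, 2], [2, 2])
def Spec_solution (A : List Int) (B : List Int) (out : Int) : Prop := out = solution_alt A B
instance (A : List Int) (B : List Int) (out : Int) : Decidable (Spec_solution A B out) := by unfold Spec_solution; infer_instance

-- ===== CLAIM (what is proved, stated in full; the proofs are below) =====
def Claim_equal_solution : Prop := ∀ (A : List Int) (B : List Int), Dom_solution A B → Pre_solution A B → Spec_solution A B (solution A B)

-- ===== LEMMAS AND PROOFS =====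

-- A's loop, as structural recursion on equal-length descending lists:
-- compare a's largest with b's largest; if a's wins, b discards its smallest.
def fA : List Int → List Int → Int
  | _, [] => 0
  | [], _ :: _ => 0
  | x :: _a, y :: b => if y ≤ x then fA _a (y :: b).dropLast else 1 + fA _a b
termination_by _a b => b.length

-- B's loop, on ascending lists u (a's unbeaten cards) and v (b's remaining cards):
-- b's smallest remaining card is matched iff it beats a's smallest unbeaten card.
def cnt : List Int → List Int → Int
  | [], _ => 0
  | _ :: _, [] => 0
  | p :: u, q :: v => if p < q then 1 + cnt u v else cnt (p :: u) v
termination_by u v => u.length + v.length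
decreasing_by all_goals (simp only [List.length_cons]; omega)

lemma fA_nil (a : List Int) : fA a [] = 0 := by cases a <;> simp [fA]

lemma cnt_nil (u : List Int) : cnt u [] = 0 := by cases u <;> simp [cnt]

-- an element at least as large as everything in v is never beaten, hence never reached
lemma cnt_concat_big (v : List Int) : ∀ (u : List Int) (x : Int), (∀ q ∈ v, q ≤ x) →
    cnt (u ++ [x]) v = cnt u v := by
  induction v with
  | nil => intro u x _; simp [cnt_nil]
  | cons q v ih =>
      intro u x hx
      cases u with
      | nil =>
          have hq : ¬ ((x : Int) < q) := by
            have := hx q (by simp); omega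
          simp only [List.nil_append, cnt, if_neg hq]
          have := ih [] x (fun r hr => hx r (by simp [hr]))
          simpa [cnt] using this
      | cons p u =>
          simp only [List.cons_append, cnt]
          by_cases hpq : p < q
          · rw [if_pos hpq, if_pos hpq, ih u x (fun r hr => hx r (by simp [hr]))]
          · rw [if_neg hpq, if_neg hpq]
            exact ih (p :: u) x (fun r hr => hx r (by simp [hr]))

-- with strictly more b-cards than a-cards (both ascending), b's smallest card is redundant
lemma cnt_tail_surplus : ∀ (u : List Int) (q : Int) (v : List Int),
    u.Pairwise (· ≤ ·) → (q :: v).Pairwise (· ≤ ·) → u.length ≤ v.length →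
    cnt u (q :: v) = cnt u v := by
  intro u
  induction u with
  | nil => intro q v _ _ _; simp [cnt]
  | cons p u ih =>
      intro q v hu hv hlen
      cases v with
      | nil => exact absurd hlen (by simp)
      | cons q1 v1 =>
          simp only [cnt]
          by_cases h0 : p < q
          · have h1 : p < q1 := by
              have : q ≤ q1 := (List.pairwise_cons.1 hv).1 q1 (by simp)
              omega
            rw [if_pos h0, if_pos h1]
            have := ih q1 v1 (List.pairwise_cons.1 hu).2
              (List.pairwise_cons.1 hv).2 (by simp only [List.length_cons] at hlen; omega)
            omega
          · rw [if_neg h0]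

lemma cnt_tail_surplus' (u w : List Int) (hu : u.Pairwise (· ≤ ·))
    (hw : w.Pairwise (· ≤ ·)) (h : u.length < w.length) : cnt u w = cnt u w.tail := by
  cases w with
  | nil => exact absurd h (by simp)
  | cons q v =>
      exact cnt_tail_surplus u q v hu hw (by simp only [List.length_cons] at h; omega)

-- a card beating every a-card always wins one extra round, appended at the strong end
lemma cnt_concat_win (v : List Int) : ∀ (u : List Int) (q : Int), (∀ p ∈ u, p < q) →
    v.length < u.length → cnt u (v ++ [q]) = cnt u v + 1 := by
  induction v with
  | nil =>
      intro u q hq hlen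
      cases u with
      | nil => exact absurd hlen (by simp)
      | cons p u =>
          have : p < q := hq p (by simp)
          simp [cnt, this, cnt_nil]
  | cons q0 v ih =>
      intro u q hq hlen
      cases u with
      | nil => exact absurd hlen (by simp)
      | cons p u =>
          simp only [List.cons_append, cnt]
          by_cases h0 : p < q0
          · rw [if_pos h0, if_pos h0,
              ih u q (fun r hr => hq r (by simp [hr]))
                (by simp only [List.length_cons] at hlen; omega)]
            omega
          · rw [if_neg h0, if_neg h0]
            exact ih (p :: u) q hq (by simp only [List.length_cons] at hlen ⊢; omega)

-- a's largest card is never consumed when b has fewer cards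
lemma cnt_dropLast_surplus : ∀ (v u : List Int), v.length < u.length →
    cnt u v = cnt u.dropLast v := by
  intro v
  induction v with
  | nil => intro u _; simp [cnt_nil]
  | cons q v ih =>
      intro u hlen
      cases u with
      | nil => exact absurd hlen (by simp)
      | cons p u =>
          cases u with
          | nil => exact absurd hlen (by simp)
          | cons p1 u1 =>
              simp only [cnt, List.dropLast_cons₂]
              by_cases h0 : p < q
              · rw [if_pos h0, if_pos h0,
                  ih (p1 :: u1) (by simp only [List.length_cons] at hlen ⊢; omega)]
              · rw [if_neg h0, if_neg h0]
                have := ih (p :: p1 :: u1)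
                  (by simp only [List.length_cons] at hlen ⊢; omega)
                rw [this, List.dropLast_cons₂]

lemma reverse_dropLast_eq_tail_reverse : ∀ (l : List Int),
    l.dropLast.reverse = l.reverse.tail
  | [] => by simp
  | [x] => by simp
  | x :: y :: l => by
      obtain ⟨z, zs, hz⟩ := List.exists_cons_of_ne_nil (by simp : (y :: l).reverse ≠ [])
      have ih := reverse_dropLast_eq_tail_reverse (y :: l)
      simp only [List.dropLast_cons₂, List.reverse_cons, ih, hz]
      simp

-- the two greedy orders agree on equal-length descending lists
lemma fA_eq_cnt : ∀ (n : Nat) (a b : List Int), b.length = n →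
    a.Pairwise (fun x y => y ≤ x) → b.Pairwise (fun x y => y ≤ x) →
    a.length = b.length → fA a b = cnt a.reverse b.reverse := by
  intro n
  induction n with
  | zero =>
      intro a b hn _ _ hlen
      cases b with
      | cons _ _ => simp at hn
      | nil =>
          cases a with
          | cons _ _ => simp at hlen
          | nil => simp [fA, cnt]
  | succ n ih =>
      intro a b hn ha hb hlen
      cases b with
      | nil => simp at hn
      | cons y b' =>
          cases a with
          | nil => simp at hlen
          | cons x a' =>
              have ha' := (List.pairwise_cons.1 ha).2
              have hb' := (List.pairwise_cons.1 hb).2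
              have hxa : ∀ z ∈ a', z ≤ x := (List.pairwise_cons.1 ha).1
              have hyb : ∀ z ∈ b', z ≤ y := (List.pairwise_cons.1 hb).1
              simp only [fA]
              by_cases hxy : y ≤ x
              · rw [if_pos hxy]
                have hdl : (y :: b').dropLast.Pairwise (fun x y : Int => y ≤ x) :=
                  List.Pairwise.sublist (List.dropLast_sublist _) hb
                have hlen' : a'.length = (y :: b').dropLast.length := by
                  simp only [List.length_cons, List.length_dropLast] at hlen ⊢; omega
                rw [ih a' (y :: b').dropLast
                  (by simp only [List.length_cons, List.length_dropLast] at hn ⊢; omega)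
                  ha' hdl hlen']
                rw [reverse_dropLast_eq_tail_reverse]
                rw [show (x :: a').reverse = a'.reverse ++ [x] by simp]
                rw [cnt_concat_big _ a'.reverse x
                  (by intro q hq
                      simp only [List.mem_reverse, List.mem_cons] at hq
                      rcases hq with hq | hq
                      · omega
                      · exact le_trans (hyb q hq) hxy)]
                exact (cnt_tail_surplus' a'.reverse (y :: b').reverse
                  (by rw [List.pairwise_reverse]; exact ha')
                  (by rw [List.pairwise_reverse]; exact hb)
                  (by simp only [List.length_reverse, List.length_cons] at hlen ⊢
                      omega)).symm
              · rw [if_neg hxy]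
                have hlen' : a'.length = b'.length := by
                  simp only [List.length_cons] at hlen; omega
                rw [ih a' b' (by simp only [List.length_cons] at hn; omega) ha' hb' hlen']
                rw [show (x :: a').reverse = a'.reverse ++ [x] by simp,
                    show (y :: b').reverse = b'.reverse ++ [y] by simp]
                rw [cnt_concat_win b'.reverse (a'.reverse ++ [x]) y
                  (by intro p hp
                      simp only [List.mem_append, List.mem_reverse,
                        List.mem_singleton] at hp
                      rcases hp with hp | hp
                      · have := hxa p hp; omega
                      · omega)
                  (by simp only [List.length_append, List.length_reverse,
                        List.length_singleton]
                      omega)]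
                rw [cnt_dropLast_surplus b'.reverse (a'.reverse ++ [x])
                    (by simp only [List.length_append, List.length_reverse,
                          List.length_singleton]
                        omega),
                    List.dropLast_concat]
                omega

lemma dropLast_take_of_le (z : List Int) (k : Nat) (h : k + 1 ≤ z.length) :
    (z.take (k + 1)).dropLast = z.take k := by
  rw [List.dropLast_eq_take, List.take_take, List.length_take]
  congr 1
  omega

-- A's indexed while-loop computes fA on the remaining segments
lemma bridgeA (As Bs : List Int) : ∀ (k : Nat) (i left right ans : Int),
    right + 1 - left = (k : Int) → 0 ≤ i → 0 ≤ left →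
    i.toNat + k ≤ As.length → left.toNat + k ≤ Bs.length →
    solLoopA As Bs ans i left right =
      ans + fA ((As.drop i.toNat).take k) ((Bs.drop left.toNat).take k) := by
  intro k
  induction k with
  | zero =>
      intro i left right ans hk _ _ _ _
      rw [solLoopA]
      rw [dif_neg (by omega)]
      simp [fA_nil]
  | succ k ih =>
      intro i left right ans hk hi hl hia hlb
      have hiA : i.toNat < As.length := by omega
      have hlB : left.toNat < Bs.length := by omega
      have hga : PySem.List.pyGet? As i = some As[i.toNat] := by
        rw [PySem.List.pyGet?_of_nonneg As hi, List.getElem?_eq_getElem hiA]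
      have hgb : PySem.List.pyGet? Bs left = some Bs[left.toNat] := by
        rw [PySem.List.pyGet?_of_nonneg Bs hl, List.getElem?_eq_getElem hlB]
      have hdropA : As.drop i.toNat = As[i.toNat] :: As.drop (i.toNat + 1) :=
        List.drop_eq_getElem_cons hiA
      have hdropB : Bs.drop left.toNat = Bs[left.toNat] :: Bs.drop (left.toNat + 1) :=
        List.drop_eq_getElem_cons hlB
      have hsA : (As.drop i.toNat).take (k + 1)
          = As[i.toNat] :: (As.drop (i.toNat + 1)).take k := by
        rw [hdropA, List.take_succ_cons]
      have hsB : (Bs.drop left.toNat).take (k + 1)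
          = Bs[left.toNat] :: (Bs.drop (left.toNat + 1)).take k := by
        rw [hdropB, List.take_succ_cons]
      have h1 : (i + 1).toNat = i.toNat + 1 := by omega
      have h2 : (left + 1).toNat = left.toNat + 1 := by omega
      rw [solLoopA]
      rw [dif_pos (by omega : left ≤ right), hga, hgb, hsA, hsB]
      simp only [fA]
      by_cases hc : Bs[left.toNat] ≤ As[i.toNat]
      · rw [if_pos hc, if_pos hc]
        have hrec := ih (i + 1) left (right - 1) ans (by omega) (by omega) hl
          (by omega) (by omega)
        rw [h1] at hrec
        rw [← hsB, dropLast_take_of_le _ k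
          (by simp only [List.length_drop]; omega)]
        rw [hrec]
      · rw [if_neg hc, if_neg hc]
        have hrec := ih (i + 1) (left + 1) right (ans + 1) (by omega) (by omega)
          (by omega) (by omega) (by omega)
        rw [h1, h2] at hrec
        rw [hrec]
        ring

-- B's pointer loop computes cnt against the reversed prefix of A
lemma bridgeB (As : List Int) : ∀ (cards : List Int) (ai ans : Int),
    (cards.length : Int) ≤ ai + 1 → ai < (As.length : Int) →
    solLoopB As cards ai ans = ans + cnt (As.take (ai + 1).toNat).reverse cards := by
  intro cards
  induction cards with
  | nil => intro ai ans _ _; simp [solLoopB, cnt_nil]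
  | cons b rest ih =>
      intro ai ans hlen hai
      have h0 : 0 ≤ ai := by simp at hlen; omega
      have haiN : ai.toNat < As.length := by omega
      have hga : PySem.List.pyGet? As ai = some As[ai.toNat] := by
        rw [PySem.List.pyGet?_of_nonneg As h0, List.getElem?_eq_getElem haiN]
      have htake : (As.take (ai + 1).toNat).reverse
          = As[ai.toNat] :: (As.take ai.toNat).reverse := by
        have h1 : (ai + 1).toNat = ai.toNat + 1 := by omega
        rw [h1, ← List.take_concat_get haiN]
        simp [List.concat_eq_append]
      rw [solLoopB, hga, htake]
      simp only [cnt]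
      by_cases hc : As[ai.toNat] < b
      · rw [if_pos hc, if_pos hc]
        have hrec := ih (ai - 1) (ans + 1) (by simp at hlen ⊢; omega) (by omega)
        rw [hrec]
        have h1 : (ai - 1 + 1).toNat = ai.toNat := by omega
        rw [h1]
        omega
      · rw [if_neg hc, if_neg hc]
        have hrec := ih ai ans (by simp at hlen ⊢; omega) hai
        rw [hrec, htake]

-- ===== VERDICT (by name: the statement is the Claim_ definition above) =====
theorem solution_spec : Claim_equal_solution := by
  intro A B _ hPre
  unfold Spec_solution solution solution_alt
  set As := PySem.List.sorted A (fun x => x) true with hAs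
  set Bs := PySem.List.sorted B (fun x => x) true with hBs
  have hlenA : As.length = A.length := PySem.List.length_sorted A _ true
  have hlenB : Bs.length = B.length := PySem.List.length_sorted B _ true
  have hmn : Bs.length ≤ As.length := by rw [hlenA, hlenB]; exact hPre
  have hpa : As.Pairwise (fun x y : Int => y ≤ x) := by
    simpa using PySem.List.sorted_pairwise_rev A (fun x => x)
  have hpb : Bs.Pairwise (fun x y : Int => y ≤ x) := by
    simpa using PySem.List.sorted_pairwise_rev B (fun x => x)
  -- A's side
  have hA := bridgeA As Bs Bs.length 0 0 ((Bs.length : Int) - 1) 0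
    (by omega) (by omega) (by omega) (by simpa using hmn) (by simp)
  -- B's side
  have hB := bridgeB As Bs.reverse ((Bs.length : Int) - 1) 0
    (by simp) (by omega)
  have h1 : ((Bs.length : Int) - 1 + 1).toNat = Bs.length := by omega
  rw [h1] at hB
  have htk : (As.take Bs.length).Pairwise (fun x y : Int => y ≤ x) :=
    List.Pairwise.sublist (List.take_sublist _ _) hpa
  have hlen : (As.take Bs.length).length = Bs.length := by
    simp; omega
  have hmain := fA_eq_cnt Bs.length (As.take Bs.length) Bs rfl htk hpb hlen
  rw [hA, hB, ← hmain]
  simp
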